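-- pv_equiv track=rewrite | github.com/6306022610113/INE_Problem | Edabit/ไอซ์-20210506T045056Z-001/ไอซ์/Edabit/don_t_roll_double.py | dice_game
-- ===== SOURCE A (Python) =====
-- def dice_game(lst):                                     # สร้างฟังก์ชั่นที่รับ list เข้ามาเป็น เลขที่ ทอยลูกเต๋าทั้งสองชุด จากนั้น
--     score = 0                                           # สร้างตัวแปรขึ้นมากำหนดให้เป็น 0
--     for a,b in lst:                                     # สร้างลูป ให้ a กับ b เช็คใน list เลขที่ 2 ชุด
--         if a == b:                                      # สร้างเงื่อนไขว่า ถ้า a = b ให้ return ค่า 0 ออกมาทันที นั้นหมายถึง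
--             return 0                                    # ทอยได้ Double นั่นเอง แต่ถ้าเกิดว่า ไม่ได้ ทอยได้ double
--         else:                                           # ให้ เลขที่ได้มา + ลงไปใน score จากนั้น return ค่า score
--             score += a+b
--     return score
-- ===== SOURCE B (Python) =====
-- def dice_game(lst):
--     if any(a == b for a, b in lst):
--         return 0
--     return sum(a + b for a, b in lst)
-- ===== Notes on version B (the rewrite author's own statement) =====
-- stated objective: idiomatic
-- what changed: Replaced the single accumulator loop with early return by two separate passes: a short-circuiting any() to detect a double, then a sum() over all pairs.
import Mathlib
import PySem

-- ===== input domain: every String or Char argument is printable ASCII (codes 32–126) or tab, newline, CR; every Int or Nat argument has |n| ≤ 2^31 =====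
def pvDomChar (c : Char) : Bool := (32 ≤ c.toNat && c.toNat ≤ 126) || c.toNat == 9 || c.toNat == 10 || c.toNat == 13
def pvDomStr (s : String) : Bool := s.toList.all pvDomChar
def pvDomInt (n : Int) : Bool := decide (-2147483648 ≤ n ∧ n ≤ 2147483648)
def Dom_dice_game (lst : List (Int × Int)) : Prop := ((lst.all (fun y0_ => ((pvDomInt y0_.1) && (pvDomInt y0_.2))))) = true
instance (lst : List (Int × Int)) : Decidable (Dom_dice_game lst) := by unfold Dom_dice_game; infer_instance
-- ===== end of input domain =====

-- B replaces A's accumulator loop with early return by two passes (any-double check, then a sum); idiomatic, same cost.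

-- ===== PORT A =====
-- A: single loop threading `score`, returning 0 immediately on a double.
def dice_game_go (lst : List (Int × Int)) (score : Int) : Int :=
  match lst with
  | [] => score
  | (a, b) :: t => if a == b then 0 else dice_game_go t (score + (a + b))

def dice_game (lst : List (Int × Int)) : Int :=
  dice_game_go lst 0

-- ===== PORT B =====
-- B: first pass checks for any double; second pass sums a+b over all pairs.
def dice_game_alt (lst : List (Int × Int)) : Int :=
  if lst.any (fun p => p.1 == p.2) then 0
  else (lst.map (fun p => p.1 + p.2)).sum

-- ===== PRECONDITION & SPEC =====
def Spec_dice_game (lst : List (Int × Int)) (out : Int) : Prop := out = dice_game_alt lst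
instance (lst : List (Int × Int)) (out : Int) : Decidable (Spec_dice_game lst out) := by unfold Spec_dice_game; infer_instance

-- ===== CLAIM (what is proved, stated in full; the proofs are below) =====
def Claim_equal_dice_game : Prop := ∀ (lst : List (Int × Int)), Dom_dice_game lst → Spec_dice_game lst (dice_game lst)

-- ===== LEMMAS AND PROOFS =====
-- Loop invariant: A's loop equals 0 if any double follows, else the carried score plus the remaining sum.
theorem dice_game_go_eq (lst : List (Int × Int)) (s : Int) :
    dice_game_go lst s =
      if lst.any (fun p => p.1 == p.2) then 0
      else s + (lst.map (fun p => p.1 + p.2)).sum := by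
  induction lst generalizing s with
  | nil => simp [dice_game_go]
  | cons h t ih =>
    obtain ⟨a, b⟩ := h
    by_cases hab : a == b
    · simp [dice_game_go, hab]
    · rw [dice_game_go, if_neg hab, ih]
      by_cases hany : t.any (fun p => p.1 == p.2)
      · simp [hany, hab]
      · simp [hany, hab]
        ring

-- ===== VERDICT (by name: the statement is the Claim_ definition above) =====
theorem dice_game_spec : Claim_equal_dice_game := by
  intro lst _
  show dice_game lst = dice_game_alt lst
  rw [dice_game, dice_game_go_eq, dice_game_alt]
  split <;> simp
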